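-- pv_equiv track=rewrite | github.com/maximilianh/pubMunch | taggers/disGeneVariant.py | rangeRemoveOverlaps
-- ===== SOURCE A (Python) =====
-- def rangeIntersection(start1, end1, start2, end2):
--     """ return amount that two ranges intersect, <0 if no intersection
--     >>> rangeIntersection(1,10, 9, 20)
--     1
--     """
--     s = max(start1,start2);
--     e = min(end1,end2);
--     return e-s;
--
-- def rangeAnyOverlap(start, end, coords):
--     """ returns true if start,end overlaps any item in coords. Coords is a list of
--     (start, end, ...) tuples.
--     >>> rangeAnyOverlap(1, 10, [(20,30), (9, 13)])
--     True
--     >>> rangeAnyOverlap(1, 10, [(20,30)])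
--     False
--     """
--     for el in coords:
--         start1, end1 = el[:2]
--         if rangeIntersection(start, end, start1, end1) > 0:
--             return True
--     return False
--
-- def rangeRemoveOverlaps(list1, list2):
--     """ given tuples that have (start, end) as their (0,1) elements,
--     remove from list1 all that overlap any in list2 and return a new filtered
--     list1. Does not assume sorted lists.  Careful: Stupid brute-force. quadratic runtime.
--     >>> rangeRemoveOverlaps( [(1,10), (10,20)], [])
--     [(1, 10), (10, 20)]
--     >>> rangeRemoveOverlaps( [(1,10), (10,20)], [(15,16)])
--     [(1, 10)]
--     """
--     if len(list2)==0:
--         return list1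
--
--     newList2 = []
--     for el1 in list1:
--         start1, end1 = el1[:2]
--         if not rangeAnyOverlap(start1, end1, list2):
--             newList2.append(el1)
--     return newList2
-- ===== SOURCE B (Python) =====
-- def rangeRemoveOverlaps(list1, list2):
--     """Merge list2 (sorted by start) into disjoint non-empty intervals once,
--     then test each list1 element against the single candidate interval found
--     by binary search: O((n+m) log m) instead of A's brute-force O(n*m)."""
--     merged = []
--     cur = None
--     for el2 in sorted(list2, key=lambda el: el[0]):
--         s, e = el2[0], el2[1]
--         if s >= e:
--             continue
--         if cur is None:
--             cur = (s, e)
--         elif s < cur[1]: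
--             if e > cur[1]:
--                 cur = (cur[0], e)
--         else:
--             merged.append(cur)
--             cur = (s, e)
--     if cur is not None:
--         merged.append(cur)
--
--     out = []
--     for el1 in list1:
--         start1, end1 = el1[0], el1[1]
--         lo, hi = 0, len(merged)
--         while lo < hi:
--             mid = (lo + hi) // 2
--             if merged[mid][0] < end1:
--                 lo = mid + 1
--             else:
--                 hi = mid
--         if lo == 0 or min(end1, merged[lo - 1][1]) - max(start1, merged[lo - 1][0]) <= 0:
--             out.append(el1)
--     return out
-- ===== Notes on version B (the rewrite author's own statement) =====
-- stated objective: faster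
-- what changed: B merges list2 once into sorted disjoint intervals and binary-searches each list1 element against the single candidate interval, replacing A's brute-force scan of all of list2 for every list1 element.
import Mathlib
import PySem

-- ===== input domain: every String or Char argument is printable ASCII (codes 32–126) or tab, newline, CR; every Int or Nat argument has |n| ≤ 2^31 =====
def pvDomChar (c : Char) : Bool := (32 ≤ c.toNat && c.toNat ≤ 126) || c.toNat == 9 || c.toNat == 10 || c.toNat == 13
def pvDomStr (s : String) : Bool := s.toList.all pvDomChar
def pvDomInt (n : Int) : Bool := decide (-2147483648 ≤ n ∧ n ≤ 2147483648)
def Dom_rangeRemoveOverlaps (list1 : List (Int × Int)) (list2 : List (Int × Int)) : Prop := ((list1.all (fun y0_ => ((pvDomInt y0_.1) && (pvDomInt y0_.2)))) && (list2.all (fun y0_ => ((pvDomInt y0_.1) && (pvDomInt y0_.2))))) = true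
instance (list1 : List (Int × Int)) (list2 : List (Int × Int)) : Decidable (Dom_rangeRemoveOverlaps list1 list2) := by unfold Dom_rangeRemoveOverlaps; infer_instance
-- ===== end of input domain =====

-- B replaces A's brute-force all-pairs scan by merging list2 once into sorted
-- disjoint intervals and binary-searching each list1 element against them.

-- ===== PORT A =====
def rangeIntersection (start1 end1 start2 end2 : Int) : Int :=
  min end1 end2 - max start1 start2

def rangeAnyOverlap (start stop : Int) (coords : List (Int × Int)) : Bool :=
  match coords with
  | [] => false
  | el :: rest =>
    if rangeIntersection start stop el.1 el.2 > 0 then true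
    else rangeAnyOverlap start stop rest

def rangeRemoveOverlaps (list1 : List (Int × Int)) (list2 : List (Int × Int)) : List (Int × Int) :=
  if list2.length == 0 then list1
  else
    list1.foldl (fun newList2 el1 =>
      if !(rangeAnyOverlap el1.1 el1.2 list2) then newList2 ++ [el1] else newList2) []

-- ===== PORT B =====
-- one step of Source B's merging loop; state = (merged so far, current open interval)
def mergeStep (st : List (Int × Int) × Option (Int × Int)) (el2 : Int × Int) :
    List (Int × Int) × Option (Int × Int) :=
  let s := el2.1
  let e := el2.2
  if s ≥ e then st
  else
    match st.2 with
    | none => (st.1, some (s, e))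
    | some cur =>
      if s < cur.2 then
        if e > cur.2 then (st.1, some (cur.1, e)) else st
      else (st.1 ++ [cur], some (s, e))

def buildMerged (list2 : List (Int × Int)) : List (Int × Int) :=
  let st := (PySem.List.sorted list2 (fun el => el.1) false).foldl mergeStep ([], none)
  match st.2 with
  | none => st.1
  | some cur => st.1 ++ [cur]

-- Source B's while-loop; merged[mid] always has 0 ≤ mid < merged.length here, so getD is exact.
-- The loop shrinks hi - lo by at least 1 per iteration, so fuel hi - lo makes the
-- recursion structural without changing the computed value on any input.
def bsearchAux (merged : List (Int × Int)) (end1 : Int) : Nat → Nat → Nat → Nat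
  | 0, lo, _ => lo
  | fuel + 1, lo, hi =>
    if lo < hi then
      let mid := (lo + hi) / 2
      if (merged.getD mid (0, 0)).1 < end1 then bsearchAux merged end1 fuel (mid + 1) hi
      else bsearchAux merged end1 fuel lo mid
    else lo

def bsearch (merged : List (Int × Int)) (end1 : Int) (lo hi : Nat) : Nat :=
  bsearchAux merged end1 (hi - lo) lo hi

def rangeRemoveOverlaps_alt (list1 : List (Int × Int)) (list2 : List (Int × Int)) : List (Int × Int) :=
  let merged := buildMerged list2
  list1.foldl (fun out el1 =>
    let lo := bsearch merged el1.2 0 merged.length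
    if lo = 0 ∨ min el1.2 (merged.getD (lo - 1) (0, 0)).2 - max el1.1 (merged.getD (lo - 1) (0, 0)).1 ≤ 0
    then out ++ [el1] else out) []

-- ===== PRECONDITION & SPEC =====
def Spec_rangeRemoveOverlaps (list1 : List (Int × Int)) (list2 : List (Int × Int)) (out : List (Int × Int)) : Prop := out = rangeRemoveOverlaps_alt list1 list2
instance (list1 : List (Int × Int)) (list2 : List (Int × Int)) (out : List (Int × Int)) : Decidable (Spec_rangeRemoveOverlaps list1 list2 out) := by unfold Spec_rangeRemoveOverlaps; infer_instance

-- ===== CLAIM (what is proved, stated in full; the proofs are below) =====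
def Claim_equal_rangeRemoveOverlaps : Prop := ∀ (list1 : List (Int × Int)) (list2 : List (Int × Int)), Dom_rangeRemoveOverlaps list1 list2 → Spec_rangeRemoveOverlaps list1 list2 (rangeRemoveOverlaps list1 list2)

-- ===== LEMMAS AND PROOFS =====

-- q = (start, end) strictly overlaps interval p
def ovp (q p : Int × Int) : Prop := max q.1 p.1 < min q.2 p.2

-- q overlaps some interval of l
def ovAny (q : Int × Int) (l : List (Int × Int)) : Prop := ∃ p ∈ l, ovp q p

lemma ovAny_append (q : Int × Int) (a b : List (Int × Int)) :
    ovAny q (a ++ b) ↔ ovAny q a ∨ ovAny q b := by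
  simp [ovAny, or_and_right, exists_or]

lemma anyOverlap_iff (s e : Int) (l : List (Int × Int)) :
    rangeAnyOverlap s e l = true ↔ ovAny (s, e) l := by
  induction l with
  | nil => simp [rangeAnyOverlap, ovAny]
  | cons p rest ih =>
    by_cases h : rangeIntersection s e p.1 p.2 > 0
    · simp only [rangeAnyOverlap, if_pos h]
      simp only [rangeIntersection] at h
      refine iff_of_true trivial ⟨p, List.mem_cons_self, ?_⟩
      simp only [ovp]; omega
    · simp only [rangeAnyOverlap, if_neg h, ih, ovAny, List.mem_cons]
      simp only [rangeIntersection, not_lt] at h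
      constructor
      · rintro ⟨x, hx, hov⟩; exact ⟨x, Or.inr hx, hov⟩
      · rintro ⟨x, hx | hx, hov⟩
        · subst hx; simp only [ovp] at hov; omega
        · exact ⟨x, hx, hov⟩

-- invariant of the merging loop's state
def GoodSt (st : List (Int × Int) × Option (Int × Int)) : Prop :=
  (∀ p ∈ st.1, p.1 < p.2) ∧
  st.1.Pairwise (fun p q => p.2 ≤ q.1) ∧
  (∀ c, st.2 = some c → c.1 < c.2 ∧ ∀ p ∈ st.1, p.2 ≤ c.1) ∧
  (st.2 = none → st.1 = [])

def stList (st : List (Int × Int) × Option (Int × Int)) : List (Int × Int) :=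
  st.1 ++ st.2.toList

lemma mergeStep_good (st : List (Int × Int) × Option (Int × Int)) (el2 : Int × Int)
    (hg : GoodSt st) (hb : ∀ c, st.2 = some c → c.1 ≤ el2.1) :
    GoodSt (mergeStep st el2) ∧
    (∀ c, (mergeStep st el2).2 = some c → c.1 ≤ el2.1) ∧
    (∀ q, ovAny q (stList (mergeStep st el2)) ↔ ovAny q (stList st) ∨ ovp q el2) := by
  obtain ⟨done, cur⟩ := st
  obtain ⟨hne, hpw, hcur, hnone⟩ := hg
  by_cases hdeg : el2.1 ≥ el2.2
  · simp only [mergeStep, if_pos hdeg]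
    refine ⟨⟨hne, hpw, hcur, hnone⟩, hb, ?_⟩
    intro q
    have : ¬ ovp q el2 := by simp only [ovp]; omega
    tauto
  · cases cur with
    | none =>
      have hd : done = [] := hnone rfl
      subst hd
      simp only [mergeStep, if_neg hdeg]
      refine ⟨⟨by simp, by simp, ?_, by simp⟩, ?_, ?_⟩
      · rintro c hc
        simp only [Option.some.injEq] at hc
        subst hc
        exact ⟨by omega, by simp⟩
      · rintro c hc
        simp only [Option.some.injEq] at hc
        subst hc; simp
      · intro q
        simp [stList, ovAny, ovp]
    | some c =>
      obtain ⟨hc12, hcd⟩ := hcur c rfl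
      have hbc : c.1 ≤ el2.1 := hb c rfl
      by_cases hlt : el2.1 < c.2
      · by_cases hext : el2.2 > c.2
        · -- extend current interval to (c.1, el2.2)
          simp only [mergeStep, if_neg hdeg, if_pos hlt, if_pos hext]
          refine ⟨⟨hne, hpw, ?_, by simp⟩, ?_, ?_⟩
          · rintro c' hc'
            simp only [Option.some.injEq] at hc'
            subst hc'
            exact ⟨by omega, hcd⟩
          · rintro c' hc'
            simp only [Option.some.injEq] at hc'
            subst hc'; simpa using hbc
          · intro q
            simp only [stList, Option.toList_some, ovAny_append]
            have : ovAny q [(c.1, el2.2)] ↔ (ovAny q [c] ∨ ovp q el2) := by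
              simp only [ovAny, List.mem_singleton, exists_eq_left, ovp]
              omega
            tauto
        · -- swallowed: state unchanged
          simp only [mergeStep, if_neg hdeg, if_pos hlt, if_neg hext]
          refine ⟨⟨hne, hpw, ?_, by simp⟩, ?_, ?_⟩
          · rintro c' hc'
            simp only [Option.some.injEq] at hc'
            subst hc'; exact ⟨hc12, hcd⟩
          · rintro c' hc'
            simp only [Option.some.injEq] at hc'
            subst hc'; exact hbc
          · intro q
            simp only [stList, Option.toList_some, ovAny_append]
            have : ovp q el2 → ovAny q [c] := by
              simp only [ovAny, List.mem_singleton, exists_eq_left, ovp]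
              omega
            tauto
      · -- push current, open a new interval
        simp only [mergeStep, if_neg hdeg, if_neg hlt]
        refine ⟨⟨?_, ?_, ?_, by simp⟩, ?_, ?_⟩
        · intro p hp
          rcases (List.mem_append.mp hp) with h | h
          · exact hne p h
          · simp only [List.mem_singleton] at h; subst h; exact hc12
        · refine List.pairwise_append.mpr ⟨hpw, by simp, ?_⟩
          intro p hp p' hp'
          simp only [List.mem_singleton] at hp'
          subst hp'; exact hcd p hp
        · rintro c' hc'
          simp only [Option.some.injEq] at hc'
          subst hc'
          refine ⟨by omega, ?_⟩
          intro p hp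
          rcases (List.mem_append.mp hp) with h | h
          · have := hcd p h; omega
          · simp only [List.mem_singleton] at h; subst h; omega
        · rintro c' hc'
          simp only [Option.some.injEq] at hc'
          subst hc'; simp
        · intro q
          simp only [stList, Option.toList_some, ovAny_append]
          have : ovAny q [(el2.1, el2.2)] ↔ ovp q el2 := by
            simp [ovAny, ovp]
          tauto

lemma mergeFold (l : List (Int × Int)) (st : List (Int × Int) × Option (Int × Int))
    (hg : GoodSt st) (hsorted : l.Pairwise (fun a b => a.1 ≤ b.1))
    (hb : ∀ c, st.2 = some c → ∀ p ∈ l, c.1 ≤ p.1) :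
    GoodSt (l.foldl mergeStep st) ∧
    ∀ q, ovAny q (stList (l.foldl mergeStep st)) ↔ ovAny q (stList st) ∨ ovAny q l := by
  induction l generalizing st with
  | nil => exact ⟨hg, fun q => by simp [ovAny]⟩
  | cons x rest ih =>
    obtain ⟨hg', hb', hov'⟩ := mergeStep_good st x hg (fun c hc => hb c hc x List.mem_cons_self)
    have hsr := (List.pairwise_cons.mp hsorted).2
    have hxr := (List.pairwise_cons.mp hsorted).1
    obtain ⟨hgf, hovf⟩ := ih (mergeStep st x) hg' hsr
      (fun c hc p hp => le_trans (hb' c hc) (hxr p hp))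
    refine ⟨hgf, fun q => ?_⟩
    rw [List.foldl_cons] at *
    have : ovAny q (x :: rest) ↔ (ovp q x ∨ ovAny q rest) := by
      simp [ovAny, or_and_right, exists_or]
    rw [hovf q, hov' q, this]
    tauto

lemma goodSt_stList (st : List (Int × Int) × Option (Int × Int)) (hg : GoodSt st) :
    (∀ p ∈ stList st, p.1 < p.2) ∧ (stList st).Pairwise (fun p q => p.2 ≤ q.1) := by
  obtain ⟨done, cur⟩ := st
  obtain ⟨hne, hpw, hcur, _⟩ := hg
  cases cur with
  | none => exact ⟨by simpa [stList] using hne, by simpa [stList] using hpw⟩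
  | some c =>
    obtain ⟨hc12, hcd⟩ := hcur c rfl
    constructor
    · intro p hp
      rcases List.mem_append.mp hp with h | h
      · exact hne p h
      · simp only [Option.toList_some, List.mem_singleton] at h ⊢
        subst h; exact hc12
    · refine List.pairwise_append.mpr ⟨hpw, by simp, ?_⟩
      intro p hp p' hp'
      simp only [Option.toList_some, List.mem_singleton] at hp'
      subst hp'; exact hcd p hp

lemma buildMerged_props (list2 : List (Int × Int)) :
    (∀ p ∈ buildMerged list2, p.1 < p.2) ∧
    (buildMerged list2).Pairwise (fun p q => p.2 ≤ q.1) ∧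
    (∀ q, ovAny q (buildMerged list2) ↔ ovAny q list2) := by
  have hinit : GoodSt (([], none) : List (Int × Int) × Option (Int × Int)) := by
    refine ⟨by simp, by simp, by simp, by simp⟩
  obtain ⟨hgf, hovf⟩ := mergeFold (PySem.List.sorted list2 (fun el => el.1) false) ([], none)
    hinit (PySem.List.sorted_pairwise list2 (fun el => el.1)) (by simp)
  have hbm : buildMerged list2 =
      stList ((PySem.List.sorted list2 (fun el => el.1) false).foldl mergeStep ([], none)) := by
    unfold buildMerged stList
    cases h : ((PySem.List.sorted list2 (fun el => el.1) false).foldl mergeStep ([], none)).2 <;>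
      simp [h]
  obtain ⟨h1, h2⟩ := goodSt_stList _ hgf
  rw [hbm]
  refine ⟨h1, h2, fun q => ?_⟩
  rw [hovf q]
  simp only [stList, Option.toList_none, List.append_nil]
  constructor
  · rintro (h | ⟨p, hp, hov⟩)
    · exact absurd h (by simp [ovAny])
    · exact ⟨p, (PySem.List.mem_sorted _ _ _ _).mp hp, hov⟩
  · rintro ⟨p, hp, hov⟩
    exact Or.inr ⟨p, (PySem.List.mem_sorted _ _ _ _).mpr hp, hov⟩

lemma bsearchAux_spec (merged : List (Int × Int)) (e1 : Int)
    (hmono : ∀ i j, i ≤ j → j < merged.length →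
      (merged.getD i (0, 0)).1 ≤ (merged.getD j (0, 0)).1) :
    ∀ (fuel lo hi : Nat), hi - lo ≤ fuel → hi ≤ merged.length → lo ≤ hi →
    (∀ j, j < lo → (merged.getD j (0, 0)).1 < e1) →
    (∀ j, hi ≤ j → j < merged.length → ¬ (merged.getD j (0, 0)).1 < e1) →
    bsearchAux merged e1 fuel lo hi ≤ merged.length ∧
    (∀ j, j < bsearchAux merged e1 fuel lo hi → (merged.getD j (0, 0)).1 < e1) ∧
    (∀ j, bsearchAux merged e1 fuel lo hi ≤ j → j < merged.length →
      ¬ (merged.getD j (0, 0)).1 < e1) := by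
  intro fuel
  induction fuel with
  | zero =>
    intro lo hi hn hhi hlohi hbelow habove
    have : lo = hi := by omega
    subst this
    exact ⟨hhi, hbelow, habove⟩
  | succ fuel ih =>
    intro lo hi hn hhi hlohi hbelow habove
    by_cases h : lo < hi
    · rw [bsearchAux, if_pos h]
      have hmidlt : (lo + hi) / 2 < hi := by omega
      have hmidge : lo ≤ (lo + hi) / 2 := by omega
      by_cases hm : (merged.getD ((lo + hi) / 2) (0, 0)).1 < e1
      · simp only [if_pos hm]
        refine ih ((lo + hi) / 2 + 1) hi (by omega) hhi (by omega) ?_ habove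
        intro j hj
        exact lt_of_le_of_lt (hmono j ((lo + hi) / 2) (by omega) (by omega)) hm
      · simp only [if_neg hm]
        refine ih lo ((lo + hi) / 2) (by omega) (by omega) (by omega) hbelow ?_
        intro j hj hjlen hcon
        exact hm (lt_of_le_of_lt (hmono ((lo + hi) / 2) j hj hjlen) hcon)
    · rw [bsearchAux, if_neg h]
      have : lo = hi := by omega
      subst this
      exact ⟨hhi, hbelow, habove⟩

lemma keep_iff (merged : List (Int × Int)) (hne : ∀ p ∈ merged, p.1 < p.2)
    (hdisj : merged.Pairwise (fun p q => p.2 ≤ q.1)) (q : Int × Int) :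
    (bsearch merged q.2 0 merged.length = 0 ∨
      min q.2 (merged.getD (bsearch merged q.2 0 merged.length - 1) (0, 0)).2 -
        max q.1 (merged.getD (bsearch merged q.2 0 merged.length - 1) (0, 0)).1 ≤ 0)
    ↔ ¬ ovAny q merged := by
  have hpw := List.pairwise_iff_getElem.mp hdisj
  have hmono : ∀ i j, i ≤ j → j < merged.length →
      (merged.getD i (0, 0)).1 ≤ (merged.getD j (0, 0)).1 := by
    intro i j hij hj
    rcases eq_or_lt_of_le hij with h | h
    · subst h; exact le_refl _
    · rw [List.getD_eq_getElem merged (0, 0) (lt_of_lt_of_le h (le_of_lt hj)),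
        List.getD_eq_getElem merged (0, 0) hj]
      have h1 := hpw i j (by omega) hj h
      have h2 := hne merged[i] (merged.getElem_mem _)
      omega
  obtain ⟨hrlen, hlt, hge⟩ := bsearchAux_spec merged q.2 hmono (merged.length - 0) 0
    merged.length (le_refl _) (le_refl _) (by omega) (by omega) (by omega)
  have hrw : bsearchAux merged q.2 (merged.length - 0) 0 merged.length =
      bsearch merged q.2 0 merged.length := rfl
  rw [hrw] at hrlen hlt hge
  set r := bsearch merged q.2 0 merged.length with hr
  constructor
  · rintro hkeep ⟨p, hp, hov⟩
    obtain ⟨k, hk, hkp⟩ := List.mem_iff_getElem.mp hp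
    subst hkp
    simp only [ovp] at hov
    have hks : (merged.getD k (0, 0)).1 < q.2 := by
      rw [List.getD_eq_getElem merged (0, 0) hk]; omega
    have hkr : k < r := by
      by_contra hcon
      exact hge k (by omega) hk hks
    rcases hkeep with h0 | hcand
    · omega
    · rw [List.getD_eq_getElem merged (0, 0) (show r - 1 < merged.length by omega)] at hcand
      have hrne := hne merged[r - 1] (merged.getElem_mem _)
      have hrlt : (merged.getD (r - 1) (0, 0)).1 < q.2 := hlt (r - 1) (by omega)
      rw [List.getD_eq_getElem merged (0, 0) (show r - 1 < merged.length by omega)] at hrlt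
      rcases Nat.lt_or_ge k (r - 1) with hk' | hk'
      · have := hpw k (r - 1) hk (by omega) hk'
        omega
      · have : k = r - 1 := by omega
        subst this
        omega
  · intro hnov
    by_cases h0 : r = 0
    · exact Or.inl h0
    · right
      have hrm : r - 1 < merged.length := by omega
      rw [List.getD_eq_getElem merged (0, 0) hrm]
      have : ¬ ovp q merged[r - 1] := fun hov => hnov ⟨merged[r - 1], merged.getElem_mem _, hov⟩
      simp only [ovp] at this
      omega

lemma alt_fold (list1 : List (Int × Int)) (list2 : List (Int × Int)) (acc : List (Int × Int)) :
    list1.foldl (fun out el1 =>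
      if !(rangeAnyOverlap el1.1 el1.2 list2) then out ++ [el1] else out) acc =
    list1.foldl (fun out el1 =>
      let lo := bsearch (buildMerged list2) el1.2 0 (buildMerged list2).length
      if lo = 0 ∨ min el1.2 ((buildMerged list2).getD (lo - 1) (0, 0)).2 -
          max el1.1 ((buildMerged list2).getD (lo - 1) (0, 0)).1 ≤ 0
      then out ++ [el1] else out) acc := by
  obtain ⟨hne, hdisj, hov⟩ := buildMerged_props list2
  induction list1 generalizing acc with
  | nil => rfl
  | cons el1 rest ih =>
    simp only [List.foldl_cons]
    have hiff := keep_iff (buildMerged list2) hne hdisj (el1.1, el1.2)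
    have hA : (!(rangeAnyOverlap el1.1 el1.2 list2)) = true ↔
        ¬ ovAny (el1.1, el1.2) list2 := by
      rw [Bool.not_eq_eq_eq_not, Bool.not_true, ← Bool.not_eq_true, anyOverlap_iff]
    have hcond := hA.trans ((not_congr (hov (el1.1, el1.2))).symm.trans hiff.symm)
    by_cases hA : (!(rangeAnyOverlap el1.1 el1.2 list2)) = true
    · rw [if_pos hA, if_pos (hcond.mp hA), ih]
    · rw [if_neg hA, if_neg (fun hc => hA (hcond.mpr hc)), ih]

-- ===== VERDICT (by name: the statement is the Claim_ definition above) =====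
theorem rangeRemoveOverlaps_spec : Claim_equal_rangeRemoveOverlaps := by
  intro list1 list2 _
  show rangeRemoveOverlaps list1 list2 = rangeRemoveOverlaps_alt list1 list2
  unfold rangeRemoveOverlaps rangeRemoveOverlaps_alt
  by_cases hnil : list2 = []
  · subst hnil
    have h0 : ((List.length ([] : List (Int × Int))) == 0) = true := rfl
    rw [if_pos h0]
    have hbm : buildMerged ([] : List (Int × Int)) = [] := rfl
    have hb0 : ∀ e1 : Int, bsearch [] e1 0 0 = 0 := fun _ => rfl
    have hfun := PySem.List.foldl_congr_mem (l := list1) (init := ([] : List (Int × Int)))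
      (f := fun out el1 =>
        let lo := bsearch (buildMerged ([] : List (Int × Int))) el1.2 0
          (buildMerged ([] : List (Int × Int))).length
        if lo = 0 ∨ min el1.2 ((buildMerged ([] : List (Int × Int))).getD (lo - 1) (0, 0)).2 -
            max el1.1 ((buildMerged ([] : List (Int × Int))).getD (lo - 1) (0, 0)).1 ≤ 0
        then out ++ [el1] else out)
      (g := fun out el1 => out ++ [el1])
      (fun acc el1 _ => by simp [hbm, hb0 el1.2])
    simp only [hfun, PySem.List.foldl_append_singleton_eq_self, List.nil_append]
  · rw [if_neg (by simpa using fun h => hnil (List.length_eq_zero_iff.mp h))]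
    exact alt_fold list1 list2 []
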